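-- pv_equiv track=rewrite | github.com/r0b3rt55/djangoProject | test.py | seturi
-- ===== SOURCE A (Python) =====
-- def seturi(lst, k):
--     seturi = []
--     for i in range(len(lst) - k + 1):
--         set_curent = []
--         for j in range(k):
--             set_curent.append(lst[i + j])
--         if len(set(set_curent)) == k:
--             seturi.append(set_curent)
--     return seturi
-- ===== SOURCE B (Python) =====
-- def seturi(lst, k):
--     n = len(lst)
--     if k < 0 or k > n:
--         return []
--     freq = {}
--     distinct = 0
--     for x in lst[:k]:
--         freq[x] = freq.get(x, 0) + 1
--         if freq[x] == 1:
--             distinct += 1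
--     res = []
--     for s in range(n - k + 1):
--         if distinct == k:
--             res.append(lst[s:s + k])
--         if s + k < n:
--             x = lst[s + k]
--             freq[x] = freq.get(x, 0) + 1
--             if freq[x] == 1:
--                 distinct += 1
--             y = lst[s]
--             freq[y] = freq.get(y, 0) - 1
--             if freq[y] == 0:
--                 distinct -= 1
--     return res
-- ===== Notes on version B (the rewrite author's own statement) =====
-- stated objective: faster
-- what changed: Replaces A's per-start rebuild of each window plus a set() distinctness test (O(n*k)) by a single sliding-window pass that maintains a frequency dict and an incremental distinct count, appending a slice only when the count equals k.
import Mathlib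
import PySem

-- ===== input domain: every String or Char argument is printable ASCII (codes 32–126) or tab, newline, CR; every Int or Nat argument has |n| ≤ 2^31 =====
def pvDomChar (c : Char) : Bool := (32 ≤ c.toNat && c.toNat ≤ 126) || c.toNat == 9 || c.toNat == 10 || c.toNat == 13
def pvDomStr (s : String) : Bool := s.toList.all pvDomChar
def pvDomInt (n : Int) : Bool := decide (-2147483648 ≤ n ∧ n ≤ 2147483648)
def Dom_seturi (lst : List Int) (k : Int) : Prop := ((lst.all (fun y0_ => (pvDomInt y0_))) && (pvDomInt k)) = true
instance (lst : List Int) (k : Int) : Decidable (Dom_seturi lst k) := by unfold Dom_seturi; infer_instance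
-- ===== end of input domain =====

-- B replaces A's per-start window rebuild + set() distinctness test by one sliding-window pass
-- with an incrementally maintained frequency dict and distinct count (objective: faster).


-- ===== PORT A =====
def seturi (lst : List Int) (k : Int) : List (List Int) :=
  (PySem.List.pyRange 0 ((lst.length : Int) - k + 1)).foldl (fun acc i =>
    let set_curent := (PySem.List.pyRange 0 k).foldl
      (fun c j => c ++ [PySem.List.pyGetD lst (i + j) 0]) []
    if (((PySem.Set.ofList set_curent).length : Int) == k) then acc ++ [set_curent] else acc) []

-- ===== PORT B =====
-- loop body of B's initial counting loop ('for x in lst[:k]: …')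
def altInitStep (p : PySem.Dict Int Int × Int) (x : Int) : PySem.Dict Int Int × Int :=
  let f := p.1.insert x (p.1.getD x 0 + 1)
  (f, if f.getD x 0 == 1 then p.2 + 1 else p.2)

-- loop body of B's main loop ('for s in range(n - k + 1): …')
def altStep (lst : List Int) (n k : Int)
    (st : PySem.Dict Int Int × Int × List (List Int)) (s : Int) :
    PySem.Dict Int Int × Int × List (List Int) :=
  let res1 := if st.2.1 == k then st.2.2 ++ [PySem.List.slice lst (some s) (some (s + k))] else st.2.2
  if s + k < n then
    let x := PySem.List.pyGetD lst (s + k) 0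
    let f1 := st.1.insert x (st.1.getD x 0 + 1)
    let d1 := if f1.getD x 0 == 1 then st.2.1 + 1 else st.2.1
    let y := PySem.List.pyGetD lst s 0
    let f2 := f1.insert y (f1.getD y 0 - 1)
    let d2 := if f2.getD y 0 == 0 then d1 - 1 else d1
    (f2, d2, res1)
  else (st.1, st.2.1, res1)

def seturi_alt (lst : List Int) (k : Int) : List (List Int) :=
  let n : Int := (lst.length : Int)
  if k < 0 ∨ n < k then []
  else
    let init := (PySem.List.slice lst none (some k)).foldl altInitStep (PySem.Dict.empty, 0)
    let r := (PySem.List.pyRange 0 (n - k + 1)).foldl (altStep lst n k) (init.1, init.2, [])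
    r.2.2

-- ===== PRECONDITION & SPEC =====
def Spec_seturi (lst : List Int) (k : Int) (out : List (List Int)) : Prop := out = seturi_alt lst k
instance (lst : List Int) (k : Int) (out : List (List Int)) : Decidable (Spec_seturi lst k out) := by unfold Spec_seturi; infer_instance

-- ===== CLAIM (what is proved, stated in full; the proofs are below) =====
def Claim_equal_seturi : Prop := ∀ (lst : List Int) (k : Int), Dom_seturi lst k → Spec_seturi lst k (seturi lst k)

-- ===== LEMMAS AND PROOFS =====

-- the window of length kt starting at s
def win (lst : List Int) (kt s : Nat) : List Int := (lst.drop s).take kt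

-- the test A applies to each window
def qtest (lst : List Int) (kt s : Nat) : Bool := (win lst kt s).toFinset.card == kt

-- the common reference value: the accepted windows over a list of start indices
def refOut (lst : List Int) (kt : Nat) (xs : List Nat) : List (List Int) :=
  (xs.filter (qtest lst kt)).map (win lst kt)

lemma pyRange_nonpos (m : Int) (h : m ≤ 0) : PySem.List.pyRange 0 m = [] := by
  simp [PySem.List.pyRange]
  omega

lemma setLen (w : List Int) : (PySem.Set.ofList w).length = w.toFinset.card := by
  have h := PySem.Set.nodup_ofList w
  rw [← List.toFinset_card_of_nodup h]
  congr 1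
  ext x
  simp [PySem.Set.mem_ofList]

lemma cast_beq (a b : Nat) : (((a : Nat) : Int) == ((b : Nat) : Int)) = (a == b) := by
  by_cases hab : a = b <;> simp [hab]

lemma win_step (lst : List Int) (kt s : Nat) (h : s + kt < lst.length) :
    win lst kt s ++ [lst.getD (s + kt) 0] = lst.getD s 0 :: win lst kt (s + 1) := by
  unfold win
  have hs : s < lst.length := by omega
  have e2 : (lst.drop s).take kt ++ [lst.getD (s + kt) 0] = (lst.drop s).take (kt + 1) := by
    rw [List.take_add_one]
    simp [List.getElem?_drop, List.getD_eq_getElem?_getD,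
      List.getElem?_eq_getElem (by omega : s + kt < lst.length)]
  have e1 : (lst.drop s).take (kt + 1) = lst.getD s 0 :: (lst.drop (s + 1)).take kt := by
    rw [List.drop_eq_getElem_cons hs, List.take_succ_cons,
      List.getD_eq_getElem?_getD, List.getElem?_eq_getElem hs]
    rfl
  rw [e2, e1]

-- A's inner loop builds exactly the window
lemma inner_window (lst : List Int) (kt s : Nat) (h : s + kt ≤ lst.length) :
    (PySem.List.pyRange 0 (kt : Int)).foldl
      (fun c j => c ++ [PySem.List.pyGetD lst ((s : Int) + j) 0]) [] = win lst kt s := by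
  rw [PySem.List.pyRange_zero_natCast, List.foldl_map,
    PySem.List.foldl_append_singleton_eq_map]
  apply List.ext_getElem
  · simp [win, List.length_take, List.length_drop]; omega
  · intro i h1 h2
    have hi : i < kt := by simpa using h1
    have hlen : s + i < lst.length := by omega
    simp only [List.nil_append, List.getElem_map, List.getElem_range, win,
      List.getElem_take, List.getElem_drop]
    have : (s : Int) + (i : Int) = ((s + i : Nat) : Int) := by push_cast; ring
    rw [this, PySem.List.pyGetD_natCast]
    simp [List.getD_eq_getElem?_getD, List.getElem?_eq_getElem hlen]

-- characterisation of A for 0 ≤ k ≤ n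
lemma A_char (lst : List Int) (k : Int) (h0 : 0 ≤ k) (h1 : k ≤ (lst.length : Int)) :
    seturi lst k = refOut lst k.toNat (List.range (lst.length - k.toNat + 1)) := by
  unfold seturi
  have hkk : k = (k.toNat : Int) := (Int.toNat_of_nonneg h0).symm
  have hm : (lst.length : Int) - k + 1 = ((lst.length - k.toNat + 1 : Nat) : Int) := by
    omega
  rw [hm, PySem.List.pyRange_zero_natCast, List.foldl_map]
  rw [PySem.List.foldl_congr_mem _ _
      (fun acc s => if qtest lst k.toNat s then acc ++ [win lst k.toNat s] else acc) []
      ?_]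
  · rw [PySem.List.foldl_append_if]
    simp [refOut]
  · intro acc s hs
    have hsm : s + k.toNat ≤ lst.length := by
      simp [List.mem_range] at hs; omega
    simp only []
    rw [hkk, inner_window lst k.toNat s hsm, setLen]
    show (if (((win lst k.toNat s).toFinset.card : Int) == (k.toNat : Int)) = true then _ else _) = _
    rw [cast_beq]
    rfl

lemma A_out_of_range (lst : List Int) (k : Int) (h : k < 0 ∨ (lst.length : Int) < k) :
    seturi lst k = [] := by
  unfold seturi
  rcases h with h | h
  · rw [pyRange_nonpos k (by omega)]
    have hb : (((PySem.Set.ofList ([] : List Int)).length : Int) == k) = false := by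
      simp [PySem.Set.ofList]
      omega
    simp only [List.foldl_nil, hb, Bool.false_eq_true, if_false]
    exact PySem.List.foldl_ignore _ _
  · rw [pyRange_nonpos ((lst.length : Int) - k + 1) (by omega)]
    rfl

-- one add step of B's counting state: f counts the multiset m, d its distinct count
lemma stepAdd (f : PySem.Dict Int Int) (d : Int) (m : List Int) (x : Int)
    (hf : ∀ z, f.getD z 0 = (m.count z : Int)) (hd : d = (m.toFinset.card : Int)) :
    (∀ z, (f.insert x (f.getD x 0 + 1)).getD z 0 = ((m ++ [x]).count z : Int)) ∧
    (if (f.insert x (f.getD x 0 + 1)).getD x 0 == 1 then d + 1 else d)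
      = ((m ++ [x]).toFinset.card : Int) := by
  have hg : ∀ z, (f.insert x (f.getD x 0 + 1)).getD z 0 = ((m ++ [x]).count z : Int) := by
    intro z
    rw [PySem.Dict.getD_insert]
    by_cases hz : z = x
    · subst hz
      simp [hf, List.count_append]
    · simp [hz, hf, List.count_append, Ne.symm hz]
  refine ⟨hg, ?_⟩
  have hx : (f.insert x (f.getD x 0 + 1)).getD x 0 = (m.count x : Int) + 1 := by
    rw [PySem.Dict.getD_insert]; simp [hf]
  have hfin : (m ++ [x]).toFinset = insert x m.toFinset := by
    ext z; simp
  by_cases hmem : x ∈ m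
  · have hcnt : m.count x ≠ 0 := by simp [List.count_eq_zero]; exact hmem
    have : ((f.insert x (f.getD x 0 + 1)).getD x 0 == 1) = false := by
      rw [hx]; simp; omega
    rw [this, hfin]
    simp [Finset.insert_eq_self.mpr (List.mem_toFinset.mpr hmem), hd]
  · have hcnt : m.count x = 0 := by simp [List.count_eq_zero]; exact hmem
    have : ((f.insert x (f.getD x 0 + 1)).getD x 0 == 1) = true := by
      rw [hx, hcnt]; simp
    rw [this, hfin]
    rw [Finset.card_insert_of_notMem (by simp [List.mem_toFinset, hmem])]
    simp [hd]

-- one remove step (removing the head y of the tracked multiset)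
lemma stepRemove (f : PySem.Dict Int Int) (d : Int) (w : List Int) (y : Int)
    (hf : ∀ z, f.getD z 0 = ((y :: w).count z : Int)) (hd : d = ((y :: w).toFinset.card : Int)) :
    (∀ z, (f.insert y (f.getD y 0 - 1)).getD z 0 = (w.count z : Int)) ∧
    (if (f.insert y (f.getD y 0 - 1)).getD y 0 == 0 then d - 1 else d)
      = (w.toFinset.card : Int) := by
  have hfy : f.getD y 0 = (w.count y : Int) + 1 := by
    rw [hf]; simp
  have hg : ∀ z, (f.insert y (f.getD y 0 - 1)).getD z 0 = (w.count z : Int) := by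
    intro z
    by_cases hz : z = y
    · subst hz
      rw [PySem.Dict.getD_insert, if_pos rfl, hfy]; ring
    · rw [PySem.Dict.getD_insert, if_neg hz, hf]
      simp only [List.count_cons]
      have : ¬ y = z := fun h => hz h.symm
      simp [this]
  refine ⟨hg, ?_⟩
  have hy : (f.insert y (f.getD y 0 - 1)).getD y 0 = (w.count y : Int) := hg y
  have hfin : (y :: w).toFinset = insert y w.toFinset := by simp
  by_cases hmem : y ∈ w
  · have hcnt : w.count y ≠ 0 := by simp [List.count_eq_zero]; exact hmem
    have hc : ((f.insert y (f.getD y 0 - 1)).getD y 0 == 0) = false := by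
      rw [hy]; simp; omega
    simp [hd, hfin, Finset.insert_eq_self.mpr (List.mem_toFinset.mpr hmem), hfy]
    omega
  · have hcnt : w.count y = 0 := by simp [List.count_eq_zero]; exact hmem
    have hc : ((f.insert y (f.getD y 0 - 1)).getD y 0 == 0) = true := by
      rw [hy, hcnt]; simp
    rw [hc, hd, hfin, Finset.card_insert_of_notMem (by simp [List.mem_toFinset, hmem])]
    simp

-- B's initial loop counts its input list
lemma initFold (w : List Int) : ∀ (f : PySem.Dict Int Int) (d : Int) (m : List Int),
    (∀ z, f.getD z 0 = (m.count z : Int)) → d = (m.toFinset.card : Int) →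
    (∀ z, (w.foldl altInitStep (f, d)).1.getD z 0 = ((m ++ w).count z : Int)) ∧
    (w.foldl altInitStep (f, d)).2 = ((m ++ w).toFinset.card : Int) := by
  induction w with
  | nil => intro f d m hf hd; simpa using ⟨hf, hd⟩
  | cons x t ih =>
    intro f d m hf hd
    have hs := stepAdd f d m x hf hd
    have := ih (f.insert x (f.getD x 0 + 1))
      (if (f.insert x (f.getD x 0 + 1)).getD x 0 == 1 then d + 1 else d)
      (m ++ [x]) hs.1 hs.2
    simp only [← List.append_cons] at this
    simp only [List.foldl_cons]
    exact this

-- B's main loop invariant: f counts the current window, d its distinct count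
lemma loopB (lst : List Int) (kt : Nat) (hk : kt ≤ lst.length) :
    ∀ (c s : Nat), s + c = lst.length - kt + 1 →
    ∀ (f : PySem.Dict Int Int) (d : Int) (res : List (List Int)),
    (∀ z, f.getD z 0 = ((win lst kt s).count z : Int)) →
    d = ((win lst kt s).toFinset.card : Int) →
    (((List.range' s c).map Int.ofNat).foldl
        (altStep lst (lst.length : Int) (kt : Int)) (f, d, res)).2.2
      = res ++ refOut lst kt (List.range' s c) := by
  intro c
  induction c with
  | zero => intro s _ f d res _ _; simp [refOut]
  | succ c ih =>
    intro s hsc f d res hf hd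
    rw [List.range'_succ, List.map_cons, List.foldl_cons,
      show Int.ofNat s = (s : Int) from rfl]
    -- the window slice B appends is the window
    have hslice : PySem.List.slice lst (some (s : Int)) (some ((s : Int) + (kt : Int)))
        = win lst kt s := PySem.List.slice_natCast_add lst s kt
    -- the append condition agrees with qtest
    have hcond : (d == (kt : Int)) = qtest lst kt s := by
      rw [hd, qtest, cast_beq]
    have hres1 : (if d == (kt : Int) then
          res ++ [PySem.List.slice lst (some (s : Int)) (some ((s : Int) + (kt : Int)))] else res)
        = res ++ refOut lst kt [s] := by
      rw [hslice, hcond, refOut]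
      by_cases hq : qtest lst kt s = true <;> simp [List.filter, hq]
    by_cases hlast : s + kt < lst.length
    · -- sliding step happens
      have hlt : ((s : Int) + (kt : Int) < (lst.length : Int)) := by omega
      have hx : PySem.List.pyGetD lst ((s : Int) + (kt : Int)) 0 = lst.getD (s + kt) 0 := by
        rw [show (s : Int) + (kt : Int) = ((s + kt : Nat) : Int) by push_cast; ring,
          PySem.List.pyGetD_natCast]
      have hy : PySem.List.pyGetD lst (s : Int) 0 = lst.getD s 0 := PySem.List.pyGetD_natCast lst s 0
      have hws := win_step lst kt s hlast
      -- add step: after adding the entering element the state tracks win s ++ [x] = y :: win (s+1)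
      have hadd := stepAdd f d (win lst kt s) (lst.getD (s + kt) 0) hf hd
      rw [hws] at hadd
      -- remove step on the head of that multiset
      have hrem := stepRemove _ _ (win lst kt (s + 1)) (lst.getD s 0) hadd.1 hadd.2
      simp only [altStep, hx, hy, if_pos hlt]
      rw [ih (s + 1) (by omega) _ _ _ hrem.1 hrem.2]
      rw [hres1, List.append_assoc]
      congr 1
      rw [refOut, refOut, refOut, ← List.map_append, ← List.filter_append]
      rfl
    · -- last iteration: no slide
      have hc0 : c = 0 := by omega
      subst hc0
      have hnlt : ¬ ((s : Int) + (kt : Int) < (lst.length : Int)) := by omega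
      simp only [altStep, if_neg hnlt]
      simp only [List.range'_zero, List.map_nil, List.foldl_nil]
      rw [hres1]

-- characterisation of B for 0 ≤ k ≤ n
lemma B_char (lst : List Int) (k : Int) (h0 : 0 ≤ k) (h1 : k ≤ (lst.length : Int)) :
    seturi_alt lst k = refOut lst k.toNat (List.range' 0 (lst.length - k.toNat + 1)) := by
  unfold seturi_alt
  rw [if_neg (by omega)]
  have hkk : k = (k.toNat : Int) := (Int.toNat_of_nonneg h0).symm
  have hkle : k.toNat ≤ lst.length := by omega
  rw [hkk]
  have htake : PySem.List.slice lst none (some ((k.toNat : Nat) : Int)) = lst.take k.toNat := by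
    rw [PySem.List.slice_to lst (by positivity)]
    simp
    omega
  have hwin0 : lst.take k.toNat = win lst k.toNat 0 := by simp [win]
  rw [htake, hwin0]
  have hinit := initFold (win lst k.toNat 0) PySem.Dict.empty 0 []
    (by intro z; simp [PySem.Dict.getD_empty]) (by simp)
  simp only [List.nil_append] at hinit
  have hm : (lst.length : Int) - (k.toNat : Int) + 1 = ((lst.length - k.toNat + 1 : Nat) : Int) := by
    omega
  rw [hm, PySem.List.pyRange_zero_natCast, List.range_eq_range']
  exact loopB lst k.toNat hkle (lst.length - k.toNat + 1) 0 (by omega) _ _ [] hinit.1 hinit.2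

-- ===== VERDICT (by name: the statement is the Claim_ definition above) =====
theorem seturi_spec : Claim_equal_seturi := by
  intro lst k _
  unfold Spec_seturi
  by_cases h : k < 0 ∨ (lst.length : Int) < k
  · rw [A_out_of_range lst k h]
    rcases h with h | h <;> simp [seturi_alt] <;> omega
  · have h0 : 0 ≤ k := by omega
    have h1 : k ≤ (lst.length : Int) := by omega
    rw [A_char lst k h0 h1, B_char lst k h0 h1, List.range_eq_range']
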